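-- pv_equiv track=rewrite | github.com/goodbetterbestco/paperx | paper_pipeline/formula_diagnostics.py | _delimiter_imbalance
-- ===== SOURCE A (Python) =====
-- def _unescaped_char(text: str, index: int) -> bool:
--     return index == 0 or text[index - 1] != "\\"
--
-- def _delimiter_imbalance(text: str, open_char: str, close_char: str) -> int:
--     balance = 0
--     for index, char in enumerate(text):
--         if not _unescaped_char(text, index):
--             continue
--         if char == open_char:
--             balance += 1
--         elif char == close_char:
--             balance -= 1
--             if balance < 0:
--                 return balance
--     return balance
-- ===== SOURCE B (Python) =====
-- def _delimiter_imbalance(text: str, open_char: str, close_char: str) -> int: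
--     # Pass 1: map each character to an integer delta (+1 open, -1 close, 0 otherwise),
--     # tracking the previous character instead of indexing for the escape rule.
--     deltas = []
--     prev = None
--     for char in text:
--         if prev == "\\":
--             deltas.append(0)
--         elif char == open_char:
--             deltas.append(1)
--         elif char == close_char:
--             deltas.append(-1)
--         else:
--             deltas.append(0)
--         prev = char
--     # Pass 2: running prefix sum and its minimum.
--     run = 0
--     mn = 0
--     for d in deltas:
--         run += d
--         if run < mn:
--             mn = run
--     return -1 if mn < 0 else run
-- ===== Notes on version B (the rewrite author's own statement) =====
-- stated objective: alternative
-- what changed: Replaces A's fused index-based scan with early return by a two-pass decomposition: a delta table built with a carried previous-character (no indexing, no _unescaped_char helper), then a prefix-sum/minimum pass that yields -1 iff some prefix sum is negative, else the total.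
import Mathlib
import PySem

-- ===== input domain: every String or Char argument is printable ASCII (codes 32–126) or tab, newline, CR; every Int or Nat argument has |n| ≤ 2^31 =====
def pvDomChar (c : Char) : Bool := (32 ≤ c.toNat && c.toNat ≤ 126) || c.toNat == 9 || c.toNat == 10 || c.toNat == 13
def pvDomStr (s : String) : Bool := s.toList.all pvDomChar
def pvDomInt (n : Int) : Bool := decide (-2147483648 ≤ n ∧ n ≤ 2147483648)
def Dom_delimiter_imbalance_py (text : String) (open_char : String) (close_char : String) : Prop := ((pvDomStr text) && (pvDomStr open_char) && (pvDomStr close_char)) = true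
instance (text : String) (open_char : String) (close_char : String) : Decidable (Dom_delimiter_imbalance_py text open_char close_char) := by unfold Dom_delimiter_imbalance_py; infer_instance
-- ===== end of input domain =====

-- B replaces A's fused index-based scan (early return on negative balance) by a two-pass
-- decomposition: a delta table built while carrying the previous character, then a
-- prefix-sum/minimum pass; same O(n) cost, different structure (objective: alternative).

-- ===== PORT A =====
-- Python _unescaped_char: index == 0 or text[index - 1] != "\\"
-- (text[index-1] is always in range when called from the loop, so pyGet? is `some` there)
def pvUnescaped (text : String) (index : Int) : Bool :=
  index == 0 || (PySem.Str.pyGet? text (index - 1) != some '\\')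

-- the `for index, char in enumerate(text)` loop with accumulator `balance` and early return
def pvALoop (text : String) (open_char : String) (close_char : String) :
    List (Int × Char) → Int → Int
  | [], balance => balance
  | (index, char) :: rest, balance =>
    if !(pvUnescaped text index) then pvALoop text open_char close_char rest balance
    else if String.mk [char] == open_char then pvALoop text open_char close_char rest (balance + 1)
    else if String.mk [char] == close_char then
      if balance - 1 < 0 then balance - 1
      else pvALoop text open_char close_char rest (balance - 1)
    else pvALoop text open_char close_char rest balance

def delimiter_imbalance_py (text : String) (open_char : String) (close_char : String) : Int :=
  pvALoop text open_char close_char (PySem.List.enumerate text.toList 0) 0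

-- ===== PORT B =====
-- the delta for one character, given the previous character (Source B's first-loop branches)
def pvDelta (open_char : String) (close_char : String) (prev : Option Char) (char : Char) : Int :=
  if prev == some '\\' then 0
  else if String.mk [char] == open_char then 1
  else if String.mk [char] == close_char then -1
  else 0

-- Source B's second-loop step: run += d; if run < mn: mn = run
def pvStep (st : Int × Int) (d : Int) : Int × Int :=
  (st.1 + d, if st.1 + d < st.2 then st.1 + d else st.2)

def delimiter_imbalance_py_alt (text : String) (open_char : String) (close_char : String) : Int :=
  let p := text.toList.foldl
    (fun (st : List Int × Option Char) char =>
      (st.1 ++ [pvDelta open_char close_char st.2 char], some char))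
    ([], none)
  let q := p.1.foldl pvStep (0, 0)
  if q.2 < 0 then -1 else q.1

-- ===== PRECONDITION & SPEC =====
def Spec_delimiter_imbalance_py (text : String) (open_char : String) (close_char : String) (out : Int) : Prop := out = delimiter_imbalance_py_alt text open_char close_char
instance (text : String) (open_char : String) (close_char : String) (out : Int) : Decidable (Spec_delimiter_imbalance_py text open_char close_char out) := by unfold Spec_delimiter_imbalance_py; infer_instance

-- ===== CLAIM (what is proved, stated in full; the proofs are below) =====
def Claim_equal_delimiter_imbalance_py : Prop := ∀ (text : String) (open_char : String) (close_char : String), Dom_delimiter_imbalance_py text open_char close_char → Spec_delimiter_imbalance_py text open_char close_char (delimiter_imbalance_py text open_char close_char)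

-- ===== LEMMAS AND PROOFS =====

-- the delta list B's first pass produces, as a structural recursion
def pvMkDeltas (open_char close_char : String) (prev : Option Char) : List Char → List Int
  | [] => []
  | c :: rest => pvDelta open_char close_char prev c :: pvMkDeltas open_char close_char (some c) rest

-- the previous character before position k of ts
def pvPrevOf (ts : List Char) (k : Nat) : Option Char :=
  if k = 0 then none else ts[k - 1]?

lemma pvBuild_eq (oc cc : String) :
    ∀ (cs : List Char) (acc : List Int) (prev : Option Char),
      (cs.foldl (fun (st : List Int × Option Char) char =>
          (st.1 ++ [pvDelta oc cc st.2 char], some char)) (acc, prev)).1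
        = acc ++ pvMkDeltas oc cc prev cs := by
  intro cs
  induction cs with
  | nil => intro acc prev; simp [pvMkDeltas]
  | cons c rest ih =>
      intro acc prev
      simp only [List.foldl_cons, pvMkDeltas]
      rw [ih]
      simp

lemma pvMn_mono : ∀ (ds : List Int) (r m : Int), (ds.foldl pvStep (r, m)).2 ≤ m := by
  intro ds
  induction ds with
  | nil => intro r m; simp
  | cons d rest ih =>
      intro r m
      simp only [List.foldl_cons, pvStep]
      refine le_trans (ih _ _) ?_
      split <;> omega

lemma pvMain (text oc cc : String) :
    ∀ (cs : List Char) (k : Nat), text.toList.drop k = cs → ∀ (b m : Int), 0 ≤ b → 0 ≤ m →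
      pvALoop text oc cc (PySem.List.enumerate cs (k : Int)) b
        = (if ((pvMkDeltas oc cc (pvPrevOf text.toList k) cs).foldl pvStep (b, m)).2 < 0 then -1
           else ((pvMkDeltas oc cc (pvPrevOf text.toList k) cs).foldl pvStep (b, m)).1) := by
  intro cs
  induction cs with
  | nil =>
      intro k hk b m hb hm
      simp [pvALoop, pvMkDeltas, PySem.List.enumerate]
      omega
  | cons c rest ih =>
      intro k hk b m hb hm
      have hklt : k < text.toList.length := by
        by_contra h
        rw [List.drop_eq_nil_of_le (by omega)] at hk
        exact List.cons_ne_nil _ _ hk.symm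
      have hck : text.toList[k]? = some c := by
        have h0 := congrArg (fun l => l[0]?) hk
        simpa [List.getElem?_drop] using h0
      have hrest : text.toList.drop (k + 1) = rest := by
        have h1 := congrArg (List.drop 1) hk
        simpa [List.drop_drop, Nat.add_comm] using h1
      have hprev1 : pvPrevOf text.toList (k + 1) = some c := by
        simp [pvPrevOf, hck]
      have hU : pvUnescaped text (k : Int) = !(pvPrevOf text.toList k == some '\\') := by
        cases k with
        | zero => simp [pvUnescaped, pvPrevOf]
        | succ j =>
            have hj : j < text.toList.length := by omega
            have hg : PySem.Str.pyGet? text (((j + 1 : Nat) : Int) - 1)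
                = some text.toList[j] := by
              have hc : ((j + 1 : Nat) : Int) - 1 = ((j : Nat) : Int) := by push_cast; ring
              rw [hc, PySem.Str.pyGet?_natCast, List.getElem?_eq_getElem hj]
            have hz : (((j + 1 : Nat) : Int) == 0) = false := by
              simp only [beq_eq_false_iff_ne, ne_eq]
              omega
            simp only [pvUnescaped, hg, hz, Bool.false_or]
            simp [pvPrevOf, List.getElem?_eq_getElem hj, bne]
      rw [PySem.List.enumerate_cons]
      have hcast : (k : Int) + 1 = ((k + 1 : Nat) : Int) := by push_cast; ring
      simp only [pvALoop, pvMkDeltas, List.foldl_cons, hU, Bool.not_not, hcast]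
      by_cases hesc : (pvPrevOf text.toList k == some '\\') = true
      · -- escaped: A skips the char, B's delta is 0
        have hd : pvDelta oc cc (pvPrevOf text.toList k) c = 0 := by
          simp [pvDelta, hesc]
        have hstep : pvStep (b, m) 0 = (b, if b < m then b else m) := by
          simp [pvStep]
        have hih := ih (k + 1) hrest b (if b < m then b else m) hb (by split <;> omega)
        rw [hprev1] at hih
        rw [if_pos hesc, hd, hstep]
        exact hih
      · rw [if_neg hesc]
        by_cases hop : (String.mk [c] == oc) = true
        · -- open delimiter
          have hd : pvDelta oc cc (pvPrevOf text.toList k) c = 1 := by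
            simp [pvDelta, hesc, hop]
          have hstep : pvStep (b, m) 1 = (b + 1, if b + 1 < m then b + 1 else m) := by
            simp [pvStep]
          have hih := ih (k + 1) hrest (b + 1) (if b + 1 < m then b + 1 else m) (by omega)
            (by split <;> omega)
          rw [hprev1] at hih
          rw [if_pos hop, hd, hstep]
          exact hih
        · rw [if_neg hop]
          by_cases hcl : (String.mk [c] == cc) = true
          · -- close delimiter
            have hd : pvDelta oc cc (pvPrevOf text.toList k) c = -1 := by
              simp [pvDelta, hesc, hop, hcl]
            rw [if_pos hcl, hd]
            by_cases hneg : b - 1 < 0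
            · -- A returns balance - 1 = -1 here; B's running minimum goes (and stays) negative
              have hstep : pvStep (b, m) (-1) = (-1, -1) := by
                simp only [pvStep, Prod.mk.injEq]
                constructor
                · omega
                · split <;> omega
              have hmn := pvMn_mono (pvMkDeltas oc cc (some c) rest) (-1) (-1)
              rw [if_pos hneg, hstep, if_pos (by omega)]
              omega
            · have hstep : pvStep (b, m) (-1) = (b - 1, if b - 1 < m then b - 1 else m) := by
                simp only [pvStep, Prod.mk.injEq]
                constructor
                · omega
                · split <;> split <;> omega
              have hih := ih (k + 1) hrest (b - 1) (if b - 1 < m then b - 1 else m) (by omega)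
                (by split <;> omega)
              rw [hprev1] at hih
              rw [if_neg hneg, hstep]
              exact hih
          · -- ordinary character
            have hd : pvDelta oc cc (pvPrevOf text.toList k) c = 0 := by
              simp [pvDelta, hesc, hop, hcl]
            have hstep : pvStep (b, m) 0 = (b, if b < m then b else m) := by
              simp [pvStep]
            have hih := ih (k + 1) hrest b (if b < m then b else m) hb (by split <;> omega)
            rw [hprev1] at hih
            rw [if_neg hcl, hd, hstep]
            exact hih

-- ===== VERDICT (by name: the statement is the Claim_ definition above) =====
theorem delimiter_imbalance_py_spec : Claim_equal_delimiter_imbalance_py := by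
  intro text oc cc _
  unfold Spec_delimiter_imbalance_py delimiter_imbalance_py delimiter_imbalance_py_alt
  have h := pvMain text oc cc text.toList 0 (by simp) 0 0 (by omega) (by omega)
  simp only [Nat.cast_zero] at h
  simp only [pvBuild_eq, List.nil_append]
  simpa [pvPrevOf] using h
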